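-- pv_equiv track=rewrite | github.com/panlab-bioinfo/GPhase | scaffold_hap/get_subgraph_scaffold.py | filter_subgraph
-- ===== SOURCE A (Python) =====
-- from collections import defaultdict, deque
--
-- def filter_subgraph(subgraph_ctgs_dict, ctg_subgraph_dict, ctgs_list):
--
--     filter_subgraph_ctgs_dict = defaultdict(list)
--     filter_ctg_subgraph_dict = defaultdict()
--
--     for subgraph_num, subgraph_ctgs in subgraph_ctgs_dict.items():
--         intersection = set(subgraph_ctgs).intersection(set(ctgs_list))
--
--         if len(intersection):
--             filter_subgraph_ctgs_dict[subgraph_num] = subgraph_ctgs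
--
--         for ctg in subgraph_ctgs:
--             filter_ctg_subgraph_dict[ctg] = subgraph_num
--
--
--     return filter_subgraph_ctgs_dict, filter_ctg_subgraph_dict
-- ===== SOURCE B (Python) =====
-- from collections import defaultdict
--
-- def filter_subgraph(subgraph_ctgs_dict, ctg_subgraph_dict, ctgs_list):
--     # one pass: invert subgraph_ctgs_dict into ctg -> [subgraph_nums containing it]
--     index = {}
--     for subgraph_num, subgraph_ctgs in subgraph_ctgs_dict.items():
--         for ctg in subgraph_ctgs:
--             index.setdefault(ctg, []).append(subgraph_num)
--     # query the inverted index with ctgs_list to find the hit subgraphs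
--     hit = set()
--     for ctg in ctgs_list:
--         hit.update(index.get(ctg, ()))
--     filter_subgraph_ctgs_dict = defaultdict(list)
--     for subgraph_num, subgraph_ctgs in subgraph_ctgs_dict.items():
--         if subgraph_num in hit:
--             filter_subgraph_ctgs_dict[subgraph_num] = subgraph_ctgs
--     # ctg -> last subgraph containing it, keys in first-occurrence order
--     filter_ctg_subgraph_dict = defaultdict(None, {ctg: nums[-1] for ctg, nums in index.items()})
--     return filter_subgraph_ctgs_dict, filter_ctg_subgraph_dict
-- ===== Notes on version B (the rewrite author's own statement) =====
-- stated objective: alternative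
-- what changed: Replaces A's per-subgraph set-intersection test with an inverted index (ctg -> subgraphs) built in one pass: the kept subgraphs are those hit when the index is queried with ctgs_list, and the ctg->subgraph map is read off the index as each ctg's last subgraph instead of by repeated overwriting.
import Mathlib
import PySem

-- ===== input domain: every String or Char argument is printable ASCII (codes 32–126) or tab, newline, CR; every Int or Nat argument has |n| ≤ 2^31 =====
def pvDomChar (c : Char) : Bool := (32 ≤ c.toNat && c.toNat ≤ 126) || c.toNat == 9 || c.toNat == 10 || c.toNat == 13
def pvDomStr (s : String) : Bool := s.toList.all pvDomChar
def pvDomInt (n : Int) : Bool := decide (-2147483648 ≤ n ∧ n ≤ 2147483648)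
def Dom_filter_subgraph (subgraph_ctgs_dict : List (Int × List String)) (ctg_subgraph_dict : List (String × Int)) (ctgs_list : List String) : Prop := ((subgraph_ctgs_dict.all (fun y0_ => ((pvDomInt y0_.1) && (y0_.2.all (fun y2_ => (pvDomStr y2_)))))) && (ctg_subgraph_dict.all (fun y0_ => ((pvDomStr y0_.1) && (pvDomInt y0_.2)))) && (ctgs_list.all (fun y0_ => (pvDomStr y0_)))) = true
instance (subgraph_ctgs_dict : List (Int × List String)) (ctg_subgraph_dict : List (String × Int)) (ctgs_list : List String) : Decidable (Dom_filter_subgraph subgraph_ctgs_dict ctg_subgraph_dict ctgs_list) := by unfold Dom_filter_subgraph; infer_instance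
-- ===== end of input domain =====

-- B replaces A's per-subgraph set-intersection scan with an inverted index (ctg → subgraphs)
-- built in one pass and then queried with ctgs_list; objective: alternative decomposition.
-- ===== PORT A =====
def filter_subgraph (subgraph_ctgs_dict : List (Int × List String)) (ctg_subgraph_dict : List (String × Int)) (ctgs_list : List String) : (List (Int × List String)) × (List (String × Int)) :=
  let res := subgraph_ctgs_dict.foldl
    (fun (acc : PySem.Dict Int (List String) × PySem.Dict String Int) p =>
      (let intersection := PySem.Set.inter (PySem.Set.ofList p.2) (PySem.Set.ofList ctgs_list)
       if PySem.Set.len intersection ≠ 0 then acc.1.insert p.1 p.2 else acc.1,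
       p.2.foldl (fun d ctg => d.insert ctg p.1) acc.2))
    (PySem.Dict.empty, PySem.Dict.empty)
  (res.1.items, res.2.items)

-- ===== PORT B =====
-- pvLast q = (ctg, nums[-1]) for an entry of the inverted index (nums is never empty there)
def pvLast (q : String × List Int) : String × Int := (q.1, q.2.getLastD 0)

def filter_subgraph_alt (subgraph_ctgs_dict : List (Int × List String)) (ctg_subgraph_dict : List (String × Int)) (ctgs_list : List String) : (List (Int × List String)) × (List (String × Int)) :=
  let index : PySem.Dict String (List Int) :=
    subgraph_ctgs_dict.foldl
      (fun d p => p.2.foldl (fun d ctg => d.modify ctg [] (fun ns => ns ++ [p.1])) d)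
      PySem.Dict.empty
  let hit : PySem.Set Int :=
    ctgs_list.foldl (fun s ctg => PySem.Set.update s (index.getD ctg [])) PySem.Set.empty
  let fsd : PySem.Dict Int (List String) :=
    subgraph_ctgs_dict.foldl
      (fun d p => if PySem.Set.contains hit p.1 then d.insert p.1 p.2 else d)
      PySem.Dict.empty
  -- dict comprehension over the index's items: its keys are distinct, so it is exactly a map
  let fcd : PySem.Dict String Int := PySem.Dict.mk (index.items.map pvLast)
  (fsd.items, fcd.items)

-- ===== PRECONDITION & SPEC =====
-- Pre_ excludes association lists whose keys repeat: a Python dict has unique keys, so such a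
-- list does not represent any input A is actually called on (dict(pairs) collapses duplicates).
def Pre_filter_subgraph (subgraph_ctgs_dict : List (Int × List String)) (ctg_subgraph_dict : List (String × Int)) (ctgs_list : List String) : Prop :=
  (subgraph_ctgs_dict.map Prod.fst).Nodup
instance (subgraph_ctgs_dict : List (Int × List String)) (ctg_subgraph_dict : List (String × Int)) (ctgs_list : List String) : Decidable (Pre_filter_subgraph subgraph_ctgs_dict ctg_subgraph_dict ctgs_list) := by unfold Pre_filter_subgraph; infer_instance

def pvWitness_filter_subgraph : (List (Int × List String)) × (List (String × Int)) × List String :=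
  ([(1, ["a", "b"]), (2, ["b", "c"])], [("a", 1)], ["c", "z"])

def Spec_filter_subgraph (subgraph_ctgs_dict : List (Int × List String)) (ctg_subgraph_dict : List (String × Int)) (ctgs_list : List String) (out : (List (Int × List String)) × (List (String × Int))) : Prop := out = filter_subgraph_alt subgraph_ctgs_dict ctg_subgraph_dict ctgs_list
instance (subgraph_ctgs_dict : List (Int × List String)) (ctg_subgraph_dict : List (String × Int)) (ctgs_list : List String) (out : (List (Int × List String)) × (List (String × Int))) : Decidable (Spec_filter_subgraph subgraph_ctgs_dict ctg_subgraph_dict ctgs_list out) := by unfold Spec_filter_subgraph; infer_instance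

-- ===== CLAIM (what is proved, stated in full; the proofs are below) =====
def Claim_equal_filter_subgraph : Prop := ∀ (subgraph_ctgs_dict : List (Int × List String)) (ctg_subgraph_dict : List (String × Int)) (ctgs_list : List String), Dom_filter_subgraph subgraph_ctgs_dict ctg_subgraph_dict ctgs_list → Pre_filter_subgraph subgraph_ctgs_dict ctg_subgraph_dict ctgs_list → Spec_filter_subgraph subgraph_ctgs_dict ctg_subgraph_dict ctgs_list (filter_subgraph subgraph_ctgs_dict ctg_subgraph_dict ctgs_list)

-- ===== LEMMAS AND PROOFS =====

-- one insertion into A's ctg→num dict tracks one append into B's inverted index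
lemma pv_insert_map_last (e : PySem.Dict String (List Int)) (c : String) (num : Int) :
    (PySem.Dict.mk (e.items.map pvLast)).insert c num
      = PySem.Dict.mk ((e.modify c [] (fun ns => ns ++ [num])).items.map pvLast) := by
  have hc : (PySem.Dict.mk (e.items.map pvLast)).contains c = e.contains c := by
    simp [PySem.Dict.contains, List.any_map, pvLast, Function.comp_def]
  simp only [PySem.Dict.modify, PySem.Dict.insert, hc]
  by_cases h : e.contains c = true
  · simp only [h, if_true, List.map_map]
    congr 1
    refine List.map_congr_left (fun p _ => ?_)
    by_cases hp : p.1 = c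
    · simp [pvLast, hp]
    · simp [pvLast, hp]
  · simp [h, pvLast]

-- inner loops (over one subgraph's ctgs) stay in step
lemma pv_inner_map_last (ctgs : List String) (num : Int) (e : PySem.Dict String (List Int)) :
    ctgs.foldl (fun d ctg => d.insert ctg num) (PySem.Dict.mk (e.items.map pvLast))
      = PySem.Dict.mk ((ctgs.foldl (fun d ctg => d.modify ctg [] (fun ns => ns ++ [num])) e).items.map pvLast) := by
  induction ctgs generalizing e with
  | nil => rfl
  | cons c rest ih => simp only [List.foldl_cons, pv_insert_map_last, ih]

-- outer loops stay in step: A's ctg→num dict is B's inverted index mapped through pvLast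
lemma pv_outer_map_last (sd : List (Int × List String)) (e : PySem.Dict String (List Int)) :
    sd.foldl (fun d p => p.2.foldl (fun d ctg => d.insert ctg p.1) d) (PySem.Dict.mk (e.items.map pvLast))
      = PySem.Dict.mk ((sd.foldl (fun d p => p.2.foldl (fun d ctg => d.modify ctg [] (fun ns => ns ++ [p.1])) d) e).items.map pvLast) := by
  induction sd generalizing e with
  | nil => rfl
  | cons p rest ih => simp only [List.foldl_cons, pv_inner_map_last, ih]

-- membership in one subgraph's contribution to the inverted index
lemma pv_mem_getD_inner (ctgs : List String) (num num' : Int) (c : String) (e : PySem.Dict String (List Int)) :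
    num' ∈ (ctgs.foldl (fun d ctg => d.modify ctg [] (fun ns => ns ++ [num])) e).getD c []
      ↔ num' ∈ e.getD c [] ∨ (c ∈ ctgs ∧ num' = num) := by
  induction ctgs generalizing e with
  | nil => simp
  | cons c' rest ih =>
    simp only [List.foldl_cons]
    rw [ih]
    by_cases hc : c = c'
    · subst hc
      rw [PySem.Dict.getD_modify_self]
      simp only [List.mem_append, List.mem_cons]
      tauto
    · rw [PySem.Dict.getD_modify_of_ne _ _ _ hc]
      simp only [List.mem_cons]
      constructor
      · rintro (h | ⟨h1, h2⟩)
        · exact Or.inl h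
        · exact Or.inr ⟨Or.inr h1, h2⟩
      · rintro (h | ⟨(rfl | h1), h2⟩)
        · exact Or.inl h
        · exact absurd rfl hc
        · exact Or.inr ⟨h1, h2⟩

-- membership in the full inverted index
lemma pv_mem_index (sd : List (Int × List String)) (num' : Int) (c : String) (e : PySem.Dict String (List Int)) :
    num' ∈ (sd.foldl (fun d p => p.2.foldl (fun d ctg => d.modify ctg [] (fun ns => ns ++ [p.1])) d) e).getD c []
      ↔ num' ∈ e.getD c [] ∨ ∃ p ∈ sd, p.1 = num' ∧ c ∈ p.2 := by
  induction sd generalizing e with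
  | nil => simp
  | cons p rest ih =>
    simp only [List.foldl_cons]
    rw [ih, pv_mem_getD_inner]
    simp only [List.mem_cons]
    constructor
    · rintro ((h | ⟨hc, rfl⟩) | ⟨q, hq, h1, h2⟩)
      · exact Or.inl h
      · exact Or.inr ⟨p, Or.inl rfl, rfl, hc⟩
      · exact Or.inr ⟨q, Or.inr hq, h1, h2⟩
    · rintro (h | ⟨q, (rfl | hq), h1, h2⟩)
      · exact Or.inl (Or.inl h)
      · exact Or.inl (Or.inr ⟨h2, h1.symm⟩)
      · exact Or.inr ⟨q, hq, h1, h2⟩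

-- membership in the hit set accumulated from the queries
lemma pv_mem_hit (cl : List String) (idx : PySem.Dict String (List Int)) (s0 : PySem.Set Int) (num : Int) :
    num ∈ cl.foldl (fun s ctg => PySem.Set.update s (idx.getD ctg [])) s0
      ↔ num ∈ s0 ∨ ∃ c ∈ cl, num ∈ idx.getD c [] := by
  induction cl generalizing s0 with
  | nil => simp
  | cons c rest ih =>
    simp only [List.foldl_cons]
    rw [ih]
    simp only [PySem.Set.mem_update, List.mem_cons]
    constructor
    · rintro ((h | h) | ⟨c', hc', h⟩)
      · exact Or.inl h
      · exact Or.inr ⟨c, Or.inl rfl, h⟩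
      · exact Or.inr ⟨c', Or.inr hc', h⟩
    · rintro (h | ⟨c', (rfl | hc'), h⟩)
      · exact Or.inl (Or.inl h)
      · exact Or.inl (Or.inr h)
      · exact Or.inr ⟨c', hc', h⟩

-- A keeps a subgraph iff its ctgs meet ctgs_list iff its number is in B's hit set
lemma pv_filter_fold_eq (sd : List (Int × List String)) (cl : List String)
    (idx : PySem.Dict String (List Int))
    (hidx : ∀ (num : Int) (c : String), num ∈ idx.getD c [] ↔ ∃ p ∈ sd, p.1 = num ∧ c ∈ p.2)
    (hpre : (sd.map Prod.fst).Nodup) :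
    sd.foldl (fun (a : PySem.Dict Int (List String)) (p : Int × List String) =>
        let intersection := PySem.Set.inter (PySem.Set.ofList p.2) (PySem.Set.ofList cl)
        if PySem.Set.len intersection ≠ 0 then a.insert p.1 p.2 else a) PySem.Dict.empty
      = sd.foldl (fun (d : PySem.Dict Int (List String)) (p : Int × List String) =>
          if PySem.Set.contains (cl.foldl (fun s ctg => PySem.Set.update s (idx.getD ctg [])) PySem.Set.empty) p.1
          then d.insert p.1 p.2 else d) PySem.Dict.empty := by
  apply PySem.List.foldl_congr_mem
  intro acc p hp
  have hlen : (PySem.Set.len (PySem.Set.inter (PySem.Set.ofList p.2) (PySem.Set.ofList cl)) ≠ 0)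
      ↔ ∃ c, c ∈ p.2 ∧ c ∈ cl := by
    simp only [PySem.Set.len, ne_eq, Nat.cast_eq_zero, List.length_eq_zero_iff]
    constructor
    · intro h
      obtain ⟨c, hc⟩ := List.exists_mem_of_ne_nil _ h
      rw [PySem.Set.mem_inter] at hc
      exact ⟨c, (PySem.Set.mem_ofList _ _).1 hc.1, (PySem.Set.mem_ofList _ _).1 hc.2⟩
    · rintro ⟨c, h1, h2⟩ hnil
      have hmem : c ∈ PySem.Set.inter (PySem.Set.ofList p.2) (PySem.Set.ofList cl) :=
        (PySem.Set.mem_inter _ _ _).2 ⟨(PySem.Set.mem_ofList _ _).2 h1, (PySem.Set.mem_ofList _ _).2 h2⟩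
      rw [hnil] at hmem
      exact absurd hmem (List.not_mem_nil)
  have hhit : (PySem.Set.contains (cl.foldl (fun s ctg => PySem.Set.update s (idx.getD ctg [])) PySem.Set.empty) p.1 = true)
      ↔ ∃ c ∈ cl, p.1 ∈ idx.getD c [] := by
    have hmem : ∀ (s : PySem.Set Int), (PySem.Set.contains s p.1 = true) ↔ p.1 ∈ s := by
      intro s; simp [PySem.Set.contains]
    rw [hmem, pv_mem_hit]
    simp [PySem.Set.empty]
  have hmid : (∃ c, c ∈ p.2 ∧ c ∈ cl) ↔ ∃ c ∈ cl, p.1 ∈ idx.getD c [] := by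
    constructor
    · rintro ⟨c, h1, h2⟩
      exact ⟨c, h2, (hidx p.1 c).2 ⟨p, hp, rfl, h1⟩⟩
    · rintro ⟨c, h2, hm⟩
      obtain ⟨q, hq, hq1, hq2⟩ := (hidx p.1 c).1 hm
      have hqp : q = p := List.inj_on_of_nodup_map hpre hq hp hq1
      exact ⟨c, hqp ▸ hq2, h2⟩
  have hcond := (hlen.trans hmid).trans hhit.symm
  show (let intersection := PySem.Set.inter (PySem.Set.ofList p.2) (PySem.Set.ofList cl)
        if PySem.Set.len intersection ≠ 0 then acc.insert p.1 p.2 else acc) = _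
  by_cases h : PySem.Set.contains (cl.foldl (fun s ctg => PySem.Set.update s (idx.getD ctg [])) PySem.Set.empty) p.1 = true
  · rw [if_pos (hcond.2 h), if_pos h]
  · rw [if_neg (fun hh => h (hcond.1 hh)), if_neg h]

-- ===== VERDICT (by name: the statement is the Claim_ definition above) =====
theorem filter_subgraph_spec : Claim_equal_filter_subgraph := by
  intro sd cd cl _ hpre
  unfold Pre_filter_subgraph at hpre
  unfold Spec_filter_subgraph filter_subgraph filter_subgraph_alt
  have hsplit :
      (List.foldl (fun (acc : PySem.Dict Int (List String) × PySem.Dict String Int) (p : Int × List String) =>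
          (let intersection := PySem.Set.inter (PySem.Set.ofList p.2) (PySem.Set.ofList cl)
           if PySem.Set.len intersection ≠ 0 then acc.1.insert p.1 p.2 else acc.1,
           p.2.foldl (fun d ctg => d.insert ctg p.1) acc.2))
        (PySem.Dict.empty, PySem.Dict.empty) sd)
      = (List.foldl (fun (a : PySem.Dict Int (List String)) (p : Int × List String) =>
            let intersection := PySem.Set.inter (PySem.Set.ofList p.2) (PySem.Set.ofList cl)
            if PySem.Set.len intersection ≠ 0 then a.insert p.1 p.2 else a) PySem.Dict.empty sd,
         List.foldl (fun (b : PySem.Dict String Int) (p : Int × List String) =>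
            p.2.foldl (fun d ctg => d.insert ctg p.1) b) PySem.Dict.empty sd) :=
    PySem.List.foldl_prod_mk
      (fun (a : PySem.Dict Int (List String)) (p : Int × List String) =>
        let intersection := PySem.Set.inter (PySem.Set.ofList p.2) (PySem.Set.ofList cl)
        if PySem.Set.len intersection ≠ 0 then a.insert p.1 p.2 else a)
      (fun (b : PySem.Dict String Int) (p : Int × List String) =>
        p.2.foldl (fun d ctg => d.insert ctg p.1) b)
      sd PySem.Dict.empty PySem.Dict.empty
  rw [hsplit]
  simp only [Prod.mk.injEq]
  constructor
  · rw [pv_filter_fold_eq sd cl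
      (sd.foldl (fun d p => p.2.foldl (fun d ctg => d.modify ctg [] (fun ns => ns ++ [p.1])) d) PySem.Dict.empty)
      (fun num c => by
        rw [pv_mem_index]
        simp [PySem.Dict.getD, PySem.Dict.get?, PySem.Dict.empty])
      hpre]
  · have h0 : (PySem.Dict.empty : PySem.Dict String Int)
        = PySem.Dict.mk (((PySem.Dict.empty : PySem.Dict String (List Int))).items.map pvLast) := rfl
    rw [h0, pv_outer_map_last]
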